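-- pv_equiv track=rewrite | github.com/IliaLarchenko/advent_of_code | 2022/6.py | solve_n
-- ===== SOURCE A (Python) =====
-- def solve_n(line, n):
--     chars = []
--     for i, c in enumerate(line):
--         if len(chars) == n:
--             chars = chars[1:]
--         if c in chars:
--             chars += [c]
--         else:
--             if len(set(chars)) == n - 1:
--                 return i + 1
--             chars += [c]
--     return None
-- ===== SOURCE B (Python) =====
-- def solve_n(line, n):
--     if n < 1:
--         return None
--     return next(
--         (i for i in range(n, len(line) + 1) if len(set(line[i - n:i])) == n),
--         None,
--     )
-- ===== Notes on version B (the rewrite author's own statement) =====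
-- stated objective: idiomatic
-- what changed: Replaces A's stateful rolling-buffer loop (trim, membership test, set-size check per character) by a direct generator scan over window end positions that checks len(set(window)) == n for each length-n slice, with an explicit n < 1 guard.
import Mathlib
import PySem

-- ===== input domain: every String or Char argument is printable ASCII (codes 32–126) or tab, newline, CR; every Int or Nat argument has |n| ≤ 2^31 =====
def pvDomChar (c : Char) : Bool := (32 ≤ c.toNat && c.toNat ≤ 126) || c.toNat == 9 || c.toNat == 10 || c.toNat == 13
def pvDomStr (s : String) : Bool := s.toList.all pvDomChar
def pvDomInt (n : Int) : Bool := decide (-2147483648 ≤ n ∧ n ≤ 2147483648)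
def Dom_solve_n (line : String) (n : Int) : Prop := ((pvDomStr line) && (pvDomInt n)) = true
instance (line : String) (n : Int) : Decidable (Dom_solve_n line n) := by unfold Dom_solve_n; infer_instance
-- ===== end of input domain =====

-- B replaces A's stateful rolling-buffer loop by an idiomatic direct scan over
-- length-n windows checking distinctness per window; same return value everywhere.

-- ===== PORT A =====
-- loop of A: state = (remaining chars of line, current index i, the rolling list `chars`)
def solveNGo (n : Int) : List Char → Int → List Char → Option Int
  | [], _, _ => none
  | c :: cs, i, chars =>
    -- if len(chars) == n: chars = chars[1:]
    let chars1 := if ((chars.length : Int) == n) then PySem.List.slice chars (some 1) none else chars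
    if chars1.contains c then solveNGo n cs (i + 1) (chars1 ++ [c])
    else if (((PySem.Set.ofList chars1).length : Int) == n - 1) then some (i + 1)
    else solveNGo n cs (i + 1) (chars1 ++ [c])

def solve_n (line : String) (n : Int) : Option Int :=
  solveNGo n line.toList 0 []

-- ===== PORT B =====
def solve_n_alt (line : String) (n : Int) : Option Int :=
  if n < 1 then none
  else
    (PySem.List.pyRange n (PySem.Str.len line + 1) 1).find?
      (fun i => PySem.Set.len (PySem.Set.ofList (PySem.List.slice line.toList (some (i - n)) (some i))) == n)

-- ===== PRECONDITION & SPEC =====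
def Spec_solve_n (line : String) (n : Int) (out : Option Int) : Prop := out = solve_n_alt line n
instance (line : String) (n : Int) (out : Option Int) : Decidable (Spec_solve_n line n out) := by unfold Spec_solve_n; infer_instance

-- ===== CLAIM (what is proved, stated in full; the proofs are below) =====
def Claim_equal_solve_n : Prop := ∀ (line : String) (n : Int), Dom_solve_n line n → Spec_solve_n line n (solve_n line n)

-- ===== LEMMAS AND PROOFS =====

-- set(xs) has as many elements as xs only if xs has no duplicates
theorem pv_nodup_of_len_ofList {α : Type} [DecidableEq α] (xs : List α)
    (h : (PySem.Set.ofList xs).length = xs.length) : xs.Nodup := by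
  have hperm : (PySem.Set.ofList xs).Perm xs.dedup := by
    rw [List.perm_ext_iff_of_nodup (PySem.Set.nodup_ofList xs) (List.nodup_dedup xs)]
    intro a
    rw [PySem.Set.mem_ofList, List.mem_dedup]
  have hlen : xs.dedup.length = xs.length := by
    rw [← hperm.length_eq, h]
  exact List.dedup_eq_self.mp ((List.dedup_sublist xs).eq_of_length hlen)

-- the window of the last m characters of the first k+1 characters
def pvWin (p : List Char) (m k : Nat) : List Char := (p.take (k + 1)).drop (k + 1 - m)

def pvPred (p : List Char) (m : Nat) (k : Nat) : Bool :=
  decide (m ≤ k + 1 ∧ (pvWin p m k).Nodup)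

def pvSpec (p : List Char) (m : Nat) : Option Int :=
  ((List.range' 0 p.length).find? (pvPred p m)).map (fun k => (k : Int) + 1)

-- find? only depends on the predicate's values on members
theorem pv_find?_congr {α : Type} (l : List α) (p q : α → Bool)
    (h : ∀ x ∈ l, p x = q x) : l.find? p = l.find? q := by
  induction l with
  | nil => rfl
  | cons a l ih =>
    simp only [List.find?_cons, h a List.mem_cons_self]
    cases q a
    · exact ih fun x hx => h x (List.mem_cons_of_mem a hx)
    · rfl

-- A returns None for n ≤ 0
theorem pv_A_nonpos (n : Int) (hn : n ≤ 0) :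
    ∀ (cs : List Char) (i : Int) (chars : List Char), solveNGo n cs i chars = none := by
  have hset : ∀ (l : List Char), (((PySem.Set.ofList l).length : Int) == n - 1) = false := by
    intro l
    simp only [beq_eq_false_iff_ne, ne_eq]
    intro h
    have h0 : (0 : Int) ≤ ((PySem.Set.ofList l).length : Int) := Int.natCast_nonneg _
    omega
  intro cs
  induction cs with
  | nil => intro i chars; rfl
  | cons c cs ih =>
    intro i chars
    simp only [solveNGo, hset, Bool.false_eq_true, if_false]
    split <;> split <;> exact ih _ _

-- loop invariant for A (n = m ≥ 1): after k characters, chars = (take k p).drop (k - m)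
theorem pv_A_loop (p : List Char) (m : Nat) (hm : 1 ≤ m) :
    ∀ (cs : List Char) (k : Nat), cs = p.drop k →
      solveNGo (m : Int) cs (k : Int) ((p.take k).drop (k - m)) =
        ((List.range' k (p.length - k)).find? (pvPred p m)).map (fun j => (j : Int) + 1) := by
  intro cs
  induction cs with
  | nil =>
    intro k hk
    have hL : p.length ≤ k := by
      have := congrArg List.length hk
      simp [List.length_drop] at this
      omega
    have : p.length - k = 0 := by omega
    rw [this]
    rfl
  | cons c cs' ih =>
    intro k hk
    have hkL : k < p.length := by
      have := congrArg List.length hk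
      simp [List.length_drop] at this
      omega
    have hck : p[k]? = some c := by
      have h0 : (p.drop k)[0]? = some c := by rw [← hk]; rfl
      rwa [List.getElem?_drop] at h0
    have hcs' : cs' = p.drop (k + 1) := by
      have := congrArg List.tail hk
      simpa [List.tail_drop] using this
    have hlenchars : ((p.take k).drop (k - m)).length = min k m := by
      simp [List.length_drop, List.length_take]
      omega
    -- the trimmed buffer
    have hchars1 :
        (if ((((p.take k).drop (k - m)).length : Int) == (m : Int)) then
            PySem.List.slice ((p.take k).drop (k - m)) (some 1) none
          else (p.take k).drop (k - m)) = (p.take k).drop (k + 1 - m) := by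
      rw [hlenchars]
      by_cases hkm : m ≤ k
      · rw [if_pos (by simp; omega), PySem.List.slice_from_one, List.tail_drop]
        congr 1
        omega
      · rw [if_neg (by simp; omega)]
        congr 1
        omega
    have hlen1 : ((p.take k).drop (k + 1 - m)).length = min k (m - 1) := by
      simp [List.length_drop, List.length_take]
      omega
    -- the window at k is the trimmed buffer plus c
    have hwin : pvWin p m k = (p.take k).drop (k + 1 - m) ++ [c] := by
      unfold pvWin
      rw [List.take_add_one, hck, Option.toList_some,
        List.drop_append_of_le_length (by simp [List.length_take]; omega)]
    -- the return condition of A is exactly pvPred p m k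
    have hcond : ((¬ ((p.take k).drop (k + 1 - m)).contains c) ∧
        (((PySem.Set.ofList ((p.take k).drop (k + 1 - m))).length : Int) = (m : Int) - 1)) ↔
        pvPred p m k = true := by
      unfold pvPred
      rw [decide_eq_true_iff, hwin, ← List.concat_eq_append, List.nodup_concat]
      constructor
      · rintro ⟨hnc, hlen⟩
        have hle := PySem.Set.length_ofList_le ((p.take k).drop (k + 1 - m))
        rw [hlen1] at hle
        have hkm : m ≤ k + 1 := by omega
        have hnd : ((p.take k).drop (k + 1 - m)).Nodup := by
          apply pv_nodup_of_len_ofList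
          rw [hlen1]
          omega
        refine ⟨hkm, ?_, hnd⟩
        simpa using hnc
      · rintro ⟨hkm, hnc, hnd⟩
        refine ⟨by simpa using hnc, ?_⟩
        rw [PySem.Set.ofList_eq_self_of_nodup _ hnd, hlen1]
        omega
    have hrange : List.range' k (p.length - k) = k :: List.range' (k + 1) (p.length - (k + 1)) := by
      have : p.length - k = (p.length - (k + 1)) + 1 := by omega
      rw [this, List.range'_succ]
    simp only [solveNGo, hchars1]
    rw [hrange]
    by_cases hP : pvPred p m k = true
    · -- A returns here
      have ⟨hnc, hlen⟩ := hcond.mpr hP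
      rw [if_neg (by simpa using hnc), if_pos (by simpa using hlen)]
      simp [hP]
    · -- A continues
      have hrec : solveNGo (m : Int) cs' ((k : Int) + 1) ((p.take k).drop (k + 1 - m) ++ [c]) =
          ((List.range' (k + 1) (p.length - (k + 1))).find? (pvPred p m)).map (fun j => (j : Int) + 1) := by
        have hstate : (p.take k).drop (k + 1 - m) ++ [c] = (p.take (k + 1)).drop (k + 1 - m) := by
          rw [← hwin]; rfl
        have hi : (k : Int) + 1 = ((k + 1 : Nat) : Int) := by push_cast; ring
        rw [hstate, hi]
        exact ih (k + 1) hcs'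
      rw [List.find?_cons]
      simp only [hP]

      by_cases hc : ((p.take k).drop (k + 1 - m)).contains c
      · rw [if_pos hc]; exact hrec
      · rw [if_neg hc, if_neg, hrec]
        simp only [beq_iff_eq]
        intro habs
        exact hP (hcond.mp ⟨by simpa using hc, habs⟩)

-- B (n = m ≥ 1) also computes pvSpec
theorem pv_B_eq (p : List Char) (m : Nat) (hm : 1 ≤ m) :
    (PySem.List.pyRange (m : Int) ((p.length : Int) + 1) 1).find?
        (fun i => PySem.Set.len (PySem.Set.ofList (PySem.List.slice p (some (i - (m : Int))) (some i))) == (m : Int)) =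
      pvSpec p m := by
  set L := p.length with hL
  by_cases hml : m ≤ L + 1
  · have hd : (((L : Int) + 1) - (m : Int)).toNat = L + 1 - m := by omega
    rw [PySem.List.pyRange_one, List.find?_map, hd]
    -- spec side: split off the first m-1 (all-false) indices
    have hsplit : List.range' 0 L = List.range' 0 (m - 1) ++ List.range' (m - 1) (L - (m - 1)) := by
      have h := List.range'_append (s := 0) (m := m - 1) (n := L - (m - 1)) (step := 1)
      simp only [Nat.zero_add, Nat.one_mul] at h
      rw [h]
      congr 1
      omega
    unfold pvSpec
    rw [← hL, hsplit, List.find?_append]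
    have hfalse : (List.range' 0 (m - 1)).find? (pvPred p m) = none := by
      rw [List.find?_eq_none]
      intro k hkmem
      have hkb : k < m - 1 := by
        have := List.mem_range'_1.mp hkmem
        omega
      unfold pvPred
      simp only [decide_eq_true_eq, not_and]
      intro habs
      omega
    rw [hfalse, Option.none_or]
    have hcnt : L - (m - 1) = L + 1 - m := by omega
    rw [hcnt, List.range'_eq_map_range, List.find?_map]
    have hpt : ∀ j ∈ List.range (L + 1 - m),
        ((fun i => PySem.Set.len (PySem.Set.ofList (PySem.List.slice p (some (i - (m : Int))) (some i))) == (m : Int)) ∘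
          (fun k : Nat => (m : Int) + (k : Int))) j = (pvPred p m ∘ (fun x => m - 1 + x)) j := by
      intro j hj
      have hjd : j < L + 1 - m := List.mem_range.mp hj
      simp only [Function.comp]
      -- both sides test distinctness of the window p[j : j+m]
      have hslice : PySem.List.slice p (some (((m : Int) + (j : Int)) - (m : Int))) (some ((m : Int) + (j : Int))) =
          (p.drop j).take m := by
        have h1 : ((m : Int) + (j : Int)) - (m : Int) = ((j : Nat) : Int) := by ring
        rw [h1, PySem.List.slice_toNat p (by omega) (by omega)]
        congr 1
        omega
      have hwlen : ((p.drop j).take m).length = m := by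
        simp [List.length_take, List.length_drop]
        omega
      have hwin : pvWin p m ((m - 1) + j) = (p.drop j).take m := by
        unfold pvWin
        have h1 : (m - 1) + j + 1 = m + j := by omega
        have h2 : m + j - m = j := by omega
        rw [h1, h2, List.drop_take]
        congr 1
        omega
      simp only [hslice, PySem.Set.len]
      unfold pvPred
      rw [hwin]
      by_cases hnd : ((p.drop j).take m).Nodup
      · rw [PySem.Set.ofList_eq_self_of_nodup _ hnd]
        simp [hwlen, hnd]
        omega
      · have hne : (PySem.Set.ofList ((p.drop j).take m)).length ≠ m := by
          intro habs
          exact hnd (pv_nodup_of_len_ofList _ (by rw [habs, hwlen]))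
        simp [hnd, hne]
    rw [pv_find?_congr _ _ _ hpt]
    cases hfind : List.find? (pvPred p m ∘ fun x => m - 1 + x) (List.range (L + 1 - m)) with
    | none => rfl
    | some j =>
      simp only [Option.map_some]
      have : ((m : Int) + (j : Int)) = (((m - 1 + j : Nat) : Int) + 1) := by omega
      simp [Option.map, this]
  · -- m > L + 1: both sides are none
    have hnil : PySem.List.pyRange (m : Int) ((L : Int) + 1) 1 = [] := by
      rw [PySem.List.pyRange_one]
      have : (((L : Int) + 1) - (m : Int)).toNat = 0 := by omega
      rw [this]
      rfl
    rw [hnil]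
    unfold pvSpec
    rw [← hL]
    have : (List.range' 0 L).find? (pvPred p m) = none := by
      rw [List.find?_eq_none]
      intro k hkmem
      have := List.mem_range'_1.mp hkmem
      unfold pvPred
      simp only [decide_eq_true_eq, not_and]
      intro habs
      omega
    rw [this]
    rfl

-- ===== VERDICT (by name: the statement is the Claim_ definition above) =====
theorem solve_n_spec : Claim_equal_solve_n := by
  intro line n _hdom
  unfold Spec_solve_n solve_n solve_n_alt
  by_cases hn : n < 1
  · rw [if_pos hn, pv_A_nonpos n (by omega)]
  · rw [if_neg hn]
    have hm : n = ((n.toNat : Nat) : Int) := by omega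
    have hm1 : 1 ≤ n.toNat := by omega
    rw [hm, PySem.Str.len_eq]
    rw [pv_B_eq line.toList n.toNat hm1]
    have h0 := pv_A_loop line.toList n.toNat hm1 line.toList 0 rfl
    simpa [pvSpec] using h0
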